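-- pv_equiv track=rewrite | github.com/pypi-data/pypi-mirror-396 | packages/re-cue/re_cue-0.3.4-py3-none-any.whl/reverse_engineer/exporters/confluence.py | _convert_blockquotes
-- ===== SOURCE A (Python) =====
-- def _convert_blockquotes(text: str) -> str:
--     """Convert Markdown blockquotes to Confluence quote macro."""
--     lines = text.split("\n")
--     result = []
--     in_quote = False
--     quote_lines = []
--
--     for line in lines:
--         if line.startswith(">"):
--             if not in_quote:
--                 in_quote = True
--             quote_lines.append(line[1:].strip())
--         else:
--             if in_quote:
--                 quote_content = "<br/>".join(quote_lines)
--                 result.append(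
--                     f'<ac:structured-macro ac:name="quote">'
--                     f"<ac:rich-text-body><p>{quote_content}</p></ac:rich-text-body>"
--                     f"</ac:structured-macro>"
--                 )
--                 in_quote = False
--                 quote_lines = []
--             result.append(line)
--
--     if in_quote:
--         quote_content = "<br/>".join(quote_lines)
--         result.append(
--             f'<ac:structured-macro ac:name="quote">'
--             f"<ac:rich-text-body><p>{quote_content}</p></ac:rich-text-body>"
--             f"</ac:structured-macro>"
--         )
--
--     return "\n".join(result)
-- ===== SOURCE B (Python) =====
-- def _convert_blockquotes(text: str) -> str:
--     """Convert Markdown blockquotes to Confluence quote macro."""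
--     lines = text.split("\n")
--     out = []
--     i = 0
--     n = len(lines)
--     while i < n:
--         if lines[i].startswith(">"):
--             j = i
--             while j < n and lines[j].startswith(">"):
--                 j += 1
--             content = "<br/>".join(l[1:].strip() for l in lines[i:j])
--             out.append(
--                 f'<ac:structured-macro ac:name="quote">'
--                 f"<ac:rich-text-body><p>{content}</p></ac:rich-text-body>"
--                 f"</ac:structured-macro>"
--             )
--             i = j
--         else:
--             out.append(lines[i])
--             i += 1
--     return "\n".join(out)
-- ===== Notes on version B (the rewrite author's own statement) =====
-- stated objective: alternative
-- what changed: Replaces the in_quote flag state machine with its duplicated end-of-input flush by a run-scanning loop that finds each maximal run of blockquote lines and emits one quote macro per run, handling the final run uniformly.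
import Mathlib
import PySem

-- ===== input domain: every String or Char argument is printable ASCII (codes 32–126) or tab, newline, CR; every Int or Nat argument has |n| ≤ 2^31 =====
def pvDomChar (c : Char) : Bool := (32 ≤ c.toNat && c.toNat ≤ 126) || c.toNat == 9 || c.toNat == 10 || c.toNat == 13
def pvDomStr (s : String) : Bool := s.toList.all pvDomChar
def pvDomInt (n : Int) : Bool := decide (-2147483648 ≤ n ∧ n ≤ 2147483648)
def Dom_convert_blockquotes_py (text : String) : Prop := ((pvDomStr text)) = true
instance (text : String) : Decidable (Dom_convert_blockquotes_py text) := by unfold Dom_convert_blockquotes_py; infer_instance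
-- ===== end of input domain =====

-- B replaces A's in_quote flag state machine (with its duplicated end-of-input flush)
-- by a run-scanning loop emitting one quote macro per maximal run of '>' lines; alternative, same cost.

-- ===== PORT A =====
-- one fold step of A's for-loop; state = (result, in_quote, quote_lines)
def convA_step (st : List String × Bool × List String) (line : String) :
    List String × Bool × List String :=
  if PySem.Str.startswith line ">" then
    (st.1, (if !st.2.1 then true else st.2.1),
      st.2.2 ++ [PySem.Str.strip (PySem.Str.slice line (some 1) none)])
  else
    if st.2.1 then
      (st.1 ++ ["<ac:structured-macro ac:name=\"quote\"><ac:rich-text-body><p>" ++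
          PySem.Str.join "<br/>" st.2.2 ++ "</p></ac:rich-text-body></ac:structured-macro>", line],
        false, ([] : List String))
    else
      (st.1 ++ [line], st.2.1, st.2.2)

def convert_blockquotes_py (text : String) : String :=
  let lines := (PySem.Str.split? text "\n").getD []   -- sep "\n" ≠ "", so split? is `some`
  let st := lines.foldl convA_step ([], false, [])
  let result :=
    if st.2.1 then
      st.1 ++ ["<ac:structured-macro ac:name=\"quote\"><ac:rich-text-body><p>" ++
          PySem.Str.join "<br/>" st.2.2 ++ "</p></ac:rich-text-body></ac:structured-macro>"]
    else st.1
  PySem.Str.join "\n" result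

-- ===== PORT B =====
-- helpers of B: quote test, per-line content, macro for one run
def altIsQ (line : String) : Bool := PySem.Str.startswith line ">"

def altContent (line : String) : String :=
  PySem.Str.strip (PySem.Str.slice line (some 1) none)

def altMacro (run : List String) : String :=
  "<ac:structured-macro ac:name=\"quote\"><ac:rich-text-body><p>" ++
    PySem.Str.join "<br/>" (run.map altContent) ++
    "</p></ac:rich-text-body></ac:structured-macro>"

-- B's while loop: scan maximal runs of '>' lines, one macro per run
def altGo : List String → List String
  | [] => []
  | line :: rest =>
    if h : altIsQ line then
      altMacro ((line :: rest).takeWhile altIsQ) :: altGo ((line :: rest).dropWhile altIsQ)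
    else
      line :: altGo rest
termination_by l => l.length
decreasing_by
  · simp [h]
    exact List.length_dropWhile_le altIsQ rest
  · simp

def convert_blockquotes_py_alt (text : String) : String :=
  PySem.Str.join "\n" (altGo ((PySem.Str.split? text "\n").getD []))

-- ===== PRECONDITION & SPEC =====
def Spec_convert_blockquotes_py (text : String) (out : String) : Prop := out = convert_blockquotes_py_alt text
instance (text : String) (out : String) : Decidable (Spec_convert_blockquotes_py text out) := by unfold Spec_convert_blockquotes_py; infer_instance

-- ===== CLAIM (what is proved, stated in full; the proofs are below) =====
def Claim_equal_convert_blockquotes_py : Prop := ∀ (text : String), Dom_convert_blockquotes_py text → Spec_convert_blockquotes_py text (convert_blockquotes_py text)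

-- ===== LEMMAS AND PROOFS =====
-- altMacro on an already-processed list of quote lines
def altMacro' (qs : List String) : String :=
  "<ac:structured-macro ac:name=\"quote\"><ac:rich-text-body><p>" ++
    PySem.Str.join "<br/>" qs ++ "</p></ac:rich-text-body></ac:structured-macro>"

-- A's final flush applied to a loop state
def convA_fin (st : List String × Bool × List String) : List String :=
  st.1 ++ (if st.2.1 then [altMacro' st.2.2] else [])

theorem altGo_cons_pos (line : String) (rest : List String) (h : altIsQ line = true) :
    altGo (line :: rest) =
      altMacro ((line :: rest).takeWhile altIsQ) :: altGo ((line :: rest).dropWhile altIsQ) := by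
  rw [altGo]; simp [h]

theorem altGo_cons_neg (line : String) (rest : List String) (h : ¬ altIsQ line = true) :
    altGo (line :: rest) = line :: altGo rest := by
  rw [altGo]; simp [h]

theorem convA_invariant (lines : List String) :
    (∀ r ql, convA_fin (lines.foldl convA_step (r, true, ql)) =
      r ++ altMacro' (ql ++ (lines.takeWhile altIsQ).map altContent) ::
        altGo (lines.dropWhile altIsQ)) ∧
    (∀ r, convA_fin (lines.foldl convA_step (r, false, [])) = r ++ altGo lines) := by
  induction lines with
  | nil =>
    refine ⟨?_, ?_⟩
    · intro r ql
      simp [convA_fin, altGo]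
    · intro r
      simp [convA_fin, altGo]
  | cons line rest ih =>
    refine ⟨?_, ?_⟩
    · intro r ql
      by_cases h : altIsQ line = true
      · have h' : PySem.Str.startswith line ">" = true := h
        have hstep : convA_step (r, true, ql) line = (r, true, ql ++ [altContent line]) := by
          unfold convA_step; rw [h']; simp [altContent]
        rw [List.foldl_cons, hstep, (ih.1 r (ql ++ [altContent line]))]
        simp [h, List.append_assoc]
      · have h' : PySem.Str.startswith line ">" = false := by
          simpa [altIsQ] using h
        have hstep : convA_step (r, true, ql) line =
            (r ++ [altMacro' ql, line], false, ([] : List String)) := by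
          unfold convA_step; rw [h']; simp [altMacro']
        rw [List.foldl_cons, hstep, (ih.2 (r ++ [altMacro' ql, line]))]
        simp [h, altGo_cons_neg line rest h]
    · intro r
      by_cases h : altIsQ line = true
      · have h' : PySem.Str.startswith line ">" = true := h
        have hstep : convA_step (r, false, []) line = (r, true, [altContent line]) := by
          unfold convA_step; rw [h']; simp [altContent]
        rw [List.foldl_cons, hstep, (ih.1 r [altContent line])]
        rw [altGo_cons_pos line rest h]
        simp [h, altMacro, altMacro']
      · have h' : PySem.Str.startswith line ">" = false := by
          simpa [altIsQ] using h
        have hstep : convA_step (r, false, []) line = (r ++ [line], false, ([] : List String)) := by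
          unfold convA_step; rw [h']; simp
        rw [List.foldl_cons, hstep, (ih.2 (r ++ [line]))]
        rw [altGo_cons_neg line rest h]
        simp

-- ===== VERDICT (by name: the statement is the Claim_ definition above) =====
theorem convert_blockquotes_py_spec : Claim_equal_convert_blockquotes_py := by
  intro text _
  unfold Spec_convert_blockquotes_py convert_blockquotes_py convert_blockquotes_py_alt
  have key := (convA_invariant ((PySem.Str.split? text "\n").getD [])).2 []
  rcases hst : List.foldl convA_step ([], false, []) ((PySem.Str.split? text "\n").getD [])
    with ⟨res, inq, ql⟩
  rw [hst] at key
  simp only [hst]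
  cases inq <;> simp [convA_fin, altMacro'] at key <;> simp [key]
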